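-- pv_equiv track=rewrite | github.com/cocodedk/cv-pro | backend/cv_generator/markdown_renderer/skills.py | render_skills
-- ===== SOURCE A (Python) =====
-- from typing import Dict, Any, List
--
-- def render_skills(skills: List[Dict[str, Any]]) -> List[str]:
--     """Render skills grouped by category, sorted alphabetically."""
--     lines: List[str] = []
--     skills_by_category: Dict[str, List[Dict[str, str]]] = {}
--     for skill in skills:
--         category = skill.get("category") or "Other"
--         name = skill.get("name", "")
--         if name:
--             skill_obj = {"name": name}
--             level = skill.get("level")
--             if level:
--                 skill_obj["level"] = level
--             skills_by_category.setdefault(category, []).append(skill_obj)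
--
--     # Sort skills within each category by name, then by level
--     for category, skill_list in skills_by_category.items():
--         skill_list.sort(
--             key=lambda s: (s.get("name", "").lower(), s.get("level", "").lower())
--         )
--
--     # Sort categories alphabetically, with "Other" last
--     sorted_categories = sorted(
--         skills_by_category.keys(), key=lambda cat: (cat == "Other", cat.lower())
--     )
--
--     # Render in sorted order
--     for category in sorted_categories:
--         skill_list = skills_by_category[category]
--         lines.append(f"### {category}")
--         for skill in skill_list:
--             name = skill.get("name", "")
--             level = skill.get("level")
--             if level:
--                 lines.append(f"- {name} ({level})")
--             else:
--                 lines.append(f"- {name}")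
--         lines.append("")
--     return lines
-- ===== SOURCE B (Python) =====
-- def render_skills(skills):
--     """Render skills grouped by category, sorted alphabetically."""
--     def norm(s):
--         return (s.get("category") or "Other", s.get("name", ""), s.get("level") or "")
--     valid = [t for t in map(norm, skills) if t[1]]
--     cats = sorted(dict.fromkeys(c for c, _, _ in valid),
--                   key=lambda c: (c == "Other", c.lower()))
--     def block(c):
--         group = sorted([(n, l) for cc, n, l in valid if cc == c],
--                        key=lambda t: (t[0].lower(), t[1].lower()))
--         return ["### " + c] + [f"- {n} ({l})" if l else f"- {n}" for n, l in group] + [""]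
--     return [line for c in cats for line in block(c)]
-- ===== Notes on version B (the rewrite author's own statement) =====
-- stated objective: alternative
-- what changed: B drops A's category->list dict built by setdefault-append and its per-entry in-place sorts: it normalizes every skill to a (category, name, level-or-'') triple once, filters truthy names, takes the ordered dedup of categories, and renders each block from a per-category filtered-and-sorted comprehension.
import Mathlib
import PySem

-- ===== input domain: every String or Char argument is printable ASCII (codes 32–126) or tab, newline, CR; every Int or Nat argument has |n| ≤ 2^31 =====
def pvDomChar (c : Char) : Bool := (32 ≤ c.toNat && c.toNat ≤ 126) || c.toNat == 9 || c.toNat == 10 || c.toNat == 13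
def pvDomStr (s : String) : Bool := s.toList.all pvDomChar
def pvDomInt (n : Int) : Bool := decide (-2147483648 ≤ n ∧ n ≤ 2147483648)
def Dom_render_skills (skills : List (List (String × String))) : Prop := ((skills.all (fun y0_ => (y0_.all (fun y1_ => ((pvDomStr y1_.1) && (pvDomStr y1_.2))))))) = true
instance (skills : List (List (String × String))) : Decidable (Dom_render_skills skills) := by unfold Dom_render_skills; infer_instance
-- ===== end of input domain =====

-- B replaces A's dict-of-lists grouping (setdefault + per-category in-place sorts) by a filtered
-- tuple list, ordered-dedup of categories, and one sorted comprehension per block (objective: alternative).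


-- ===== PORT A =====
-- literal transliteration of A: build a Dict category → list of skill_obj Dicts via setdefault-append
-- (= modify), sort each value list in place, sort the keys ("Other" last), render with append loops.
def render_skills (skills : List (List (String × String))) : List String :=
  let skills_by_category : PySem.Dict String (List (PySem.Dict String String)) :=
    skills.foldl (fun d skill =>
      let sd := PySem.Dict.mk skill
      let category := match sd.get? "category" with
        | some c => if c ≠ "" then c else "Other"
        | none => "Other"
      let name := sd.getD "name" ""
      if name ≠ "" then
        let skill_obj : PySem.Dict String String :=
          PySem.Dict.insert PySem.Dict.empty "name" name
        let skill_obj := match sd.get? "level" with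
          | some l => if l ≠ "" then skill_obj.insert "level" l else skill_obj
          | none => skill_obj
        d.modify category [] (fun lst => lst ++ [skill_obj])
      else d) PySem.Dict.empty
  -- skill_list.sort(key=...) for each item, in place
  let skills_by_category : PySem.Dict String (List (PySem.Dict String String)) :=
    PySem.Dict.mk (skills_by_category.items.map (fun p =>
      (p.1, PySem.List.sorted2 p.2
              (fun s => PySem.Str.lower (s.getD "name" ""))
              (fun s => PySem.Str.lower (s.getD "level" "")))))
  let sorted_categories := PySem.List.sorted2 skills_by_category.keys
      (fun cat => decide (cat = "Other")) (fun cat => PySem.Str.lower cat)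
  sorted_categories.foldl (fun lines category =>
    let skill_list := skills_by_category.getD category []
    let lines := lines ++ ["### " ++ category]
    let lines := skill_list.foldl (fun lines s =>
      let name := s.getD "name" ""
      match s.get? "level" with
      | some l =>
        if l ≠ "" then lines ++ ["- " ++ name ++ " (" ++ l ++ ")"]
        else lines ++ ["- " ++ name]
      | none => lines ++ ["- " ++ name]) lines
    lines ++ [""]) []

-- ===== PORT B =====
-- B-side helper: Source B's norm(s) — one skill dict as a (category, name, level-or-"") triple
def pvNorm (s : List (String × String)) : String × String × String :=
  let sd := PySem.Dict.mk s
  ((match sd.get? "category" with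
    | some c => if c ≠ "" then c else "Other"
    | none => "Other"),
   sd.getD "name" "",
   (sd.get? "level").getD "")

-- literal transliteration of B (Source B): normalize, keep truthy names, dedup categories in
-- first-occurrence order, sort them, emit one block per category from a sorted comprehension.
def render_skills_alt (skills : List (List (String × String))) : List String :=
  let valid := (skills.map pvNorm).filter (fun t => t.2.1 ≠ "")
  let cats := PySem.List.sorted2 (PySem.List.dedup (valid.map (·.1)))
      (fun c => decide (c = "Other")) (fun c => PySem.Str.lower c)
  let block : String → List String := fun c =>
    let group := PySem.List.sorted2 ((valid.filter (fun t => t.1 = c)).map (·.2))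
        (fun t => PySem.Str.lower t.1) (fun t => PySem.Str.lower t.2)
    ["### " ++ c] ++
      group.map (fun t =>
        if t.2 ≠ "" then "- " ++ t.1 ++ " (" ++ t.2 ++ ")" else "- " ++ t.1) ++
      [""]
  cats.flatMap block

-- ===== PRECONDITION & SPEC =====
def Spec_render_skills (skills : List (List (String × String))) (out : List String) : Prop := out = render_skills_alt skills
instance (skills : List (List (String × String))) (out : List String) : Decidable (Spec_render_skills skills out) := by unfold Spec_render_skills; infer_instance

-- ===== CLAIM (what is proved, stated in full; the proofs are below) =====
def Claim_equal_render_skills : Prop := ∀ (skills : List (List (String × String))), Dom_render_skills skills → Spec_render_skills skills (render_skills skills)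

-- ===== LEMMAS AND PROOFS =====

-- A's skill_obj, as a function of the (name, level-or-"") part of B's normalized triple
def pvObj2 (t : String × String) : PySem.Dict String String :=
  if t.2 ≠ "" then PySem.Dict.mk [("name", t.1), ("level", t.2)]
  else PySem.Dict.mk [("name", t.1)]

theorem pvObj2_eq (name : String) (lvl? : Option String) :
    (match lvl? with
      | some l => if l ≠ "" then (PySem.Dict.insert PySem.Dict.empty "name" name).insert "level" l
                  else PySem.Dict.insert PySem.Dict.empty "name" name
      | none => PySem.Dict.insert PySem.Dict.empty "name" name)
      = pvObj2 (name, lvl?.getD "") := by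
  have h1 : PySem.Dict.insert PySem.Dict.empty "name" name = PySem.Dict.mk [("name", name)] := by
    apply PySem.Dict.ext
    simp [PySem.Dict.items_insert, PySem.Dict.contains_empty]
    rfl
  have h2 : ∀ l : String, (PySem.Dict.mk [("name", name)]).insert "level" l
      = PySem.Dict.mk [("name", name), ("level", l)] := by
    intro l
    apply PySem.Dict.ext
    rw [PySem.Dict.items_insert]
    simp
  match lvl? with
  | none => simp [pvObj2, h1]
  | some l =>
    by_cases hl : l = ""
    · simp [pvObj2, hl, h1]
    · simp [pvObj2, hl, h1, h2]

-- A's grouping foldl over skills equals the modify-append foldl over B's valid triples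
theorem pvFold_eq (skills : List (List (String × String)))
    (d : PySem.Dict String (List (PySem.Dict String String))) :
    skills.foldl (fun d skill =>
      let sd := PySem.Dict.mk skill
      let category := match sd.get? "category" with
        | some c => if c ≠ "" then c else "Other"
        | none => "Other"
      let name := sd.getD "name" ""
      if name ≠ "" then
        let skill_obj : PySem.Dict String String :=
          PySem.Dict.insert PySem.Dict.empty "name" name
        let skill_obj := match sd.get? "level" with
          | some l => if l ≠ "" then skill_obj.insert "level" l else skill_obj
          | none => skill_obj
        d.modify category [] (fun lst => lst ++ [skill_obj])
      else d) d
    = ((skills.map pvNorm).filter (fun t => t.2.1 ≠ "")).foldl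
        (fun d t => d.modify t.1 [] (fun lst => lst ++ [pvObj2 t.2])) d := by
  induction skills generalizing d with
  | nil => rfl
  | cons skill rest ih =>
    simp only [List.foldl, List.map, List.filter]
    by_cases hn : (PySem.Dict.mk skill).getD "name" "" = ""
    · simp only [pvNorm, hn]
      simp only [ne_eq, not_true_eq_false, if_false, decide_false]
      exact ih d
    · have hobj := pvObj2_eq ((PySem.Dict.mk skill).getD "name" "") ((PySem.Dict.mk skill).get? "level")
      simp only [pvNorm, ne_eq, hn, not_false_eq_true, if_true, decide_true]
      rw [List.foldl_cons]
      simp only [ne_eq] at hobj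
      rw [hobj]
      exact ih _

-- insertBy commutes with map when the comparison factors through the map
theorem pvInsertBy_map {α β : Type} (f : α → β) (bf : β → β → Bool) (ba : α → α → Bool)
    (h : ∀ a b, bf (f a) (f b) = ba a b) (x : α) (ys : List α) :
    PySem.List.insertBy bf (f x) (ys.map f) = (PySem.List.insertBy ba x ys).map f := by
  induction ys with
  | nil => rfl
  | cons y ys ih =>
    simp only [List.map, PySem.List.insertBy, h]
    by_cases hb : ba x y = true
    · simp [hb]
    · simp [hb, ih]

theorem pvFoldInsertBy_map {α β : Type} (f : α → β) (bf : β → β → Bool) (ba : α → α → Bool)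
    (h : ∀ a b, bf (f a) (f b) = ba a b) (xs : List α) (acc : List α) :
    (xs.map f).foldl (fun acc x => PySem.List.insertBy bf x acc) (acc.map f)
      = (xs.foldl (fun acc x => PySem.List.insertBy ba x acc) acc).map f := by
  induction xs generalizing acc with
  | nil => rfl
  | cons x xs ih => simpa [pvInsertBy_map f bf ba h] using ih (PySem.List.insertBy ba x acc)

theorem pvSorted2_map {α β κ₁ κ₂ : Type} [LT κ₁] [DecidableLT κ₁] [LT κ₂] [DecidableLT κ₂]
    (f : α → β) (k1 : β → κ₁) (k2 : β → κ₂) (xs : List α) :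
    PySem.List.sorted2 (xs.map f) k1 k2
      = (PySem.List.sorted2 xs (fun a => k1 (f a)) (fun a => k2 (f a))).map f := by
  exact pvFoldInsertBy_map f _ _ (fun a b => rfl) xs []

-- first-match lookup through a value-mapping of an association list
theorem pvGetD_mk_map (g : List (PySem.Dict String String) → List (PySem.Dict String String))
    (hg : g [] = []) (l : List (String × List (PySem.Dict String String))) (c : String) :
    (PySem.Dict.mk (l.map (fun p => (p.1, g p.2)))).getD c [] = g ((PySem.Dict.mk l).getD c []) := by
  induction l with
  | nil =>
    have he : (PySem.Dict.mk ([] : List (String × List (PySem.Dict String String)))).get? c = none := rfl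
    simp [PySem.Dict.getD_eq_get?_getD, he, hg]
  | cons p rest ih =>
    obtain ⟨k, v⟩ := p
    simp only [List.map, PySem.Dict.getD_eq_get?_getD, PySem.Dict.get?_mk_cons]
    by_cases hc : k == c
    · simp [hc]
    · simp only [hc, Bool.false_eq_true, ite_false]
      simpa [PySem.Dict.getD_eq_get?_getD] using ih

-- A's rendered line for one skill_obj, and B's for one (name, level) pair
def pvLine (s : PySem.Dict String String) : String :=
  let name := s.getD "name" ""
  match s.get? "level" with
  | some l => if l ≠ "" then "- " ++ name ++ " (" ++ l ++ ")" else "- " ++ name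
  | none => "- " ++ name

def pvLineB (t : String × String) : String :=
  if t.2 ≠ "" then "- " ++ t.1 ++ " (" ++ t.2 ++ ")" else "- " ++ t.1

theorem pvGet?_name (n l : String) : (pvObj2 (n, l)).get? "name" = some n := by
  unfold pvObj2
  split_ifs <;> simp [PySem.Dict.get?_mk_cons]

theorem pvGet?_level (n l : String) :
    (pvObj2 (n, l)).get? "level" = if l ≠ "" then some l else none := by
  unfold pvObj2
  by_cases hl : l = "" <;>
    simp [hl, PySem.Dict.get?_mk_cons,
      show (PySem.Dict.mk ([] : List (String × String))).get? "level" = none from rfl]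

theorem pvLine_obj (t : String × String) : pvLine (pvObj2 t) = pvLineB t := by
  obtain ⟨n, l⟩ := t
  unfold pvLine pvLineB
  rw [pvGet?_level, PySem.Dict.getD_eq_get?_getD, pvGet?_name]
  by_cases hl : l = "" <;> simp [hl]

theorem pvKeyName (t : String × String) :
    PySem.Str.lower ((pvObj2 t).getD "name" "") = PySem.Str.lower t.1 := by
  rw [PySem.Dict.getD_eq_get?_getD, pvGet?_name]
  rfl

theorem pvKeyLevel (t : String × String) :
    PySem.Str.lower ((pvObj2 t).getD "level" "") = PySem.Str.lower t.2 := by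
  rw [PySem.Dict.getD_eq_get?_getD, pvGet?_level]
  by_cases hl : t.2 = "" <;> simp [hl]

theorem render_skills_eq (skills : List (List (String × String))) :
    render_skills skills = render_skills_alt skills := by
  simp only [render_skills, render_skills_alt]
  rw [pvFold_eq]
  set V := (skills.map pvNorm).filter (fun t => t.2.1 ≠ "") with hV
  set G := V.foldl (fun d t => d.modify t.1 [] fun lst => lst ++ [pvObj2 t.2]) PySem.Dict.empty with hG
  set M := PySem.Dict.mk (G.items.map (fun p =>
    (p.1, PySem.List.sorted2 p.2 (fun s => PySem.Str.lower (s.getD "name" ""))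
            (fun s => PySem.Str.lower (s.getD "level" ""))))) with hM
  have hGfold : G = (V.map (fun t => (t.1, pvObj2 t.2))).foldl
      (fun d p => d.modify p.1 [] fun lst => lst ++ [p.2]) PySem.Dict.empty := by
    rw [hG, List.foldl_map]
  have hkeysG : G.keys = PySem.List.dedup (V.map (·.1)) := by
    rw [hG, PySem.Dict.keys_foldl_modify_key (key := fun t : String × String × String => t.1)]
    rw [PySem.Dict.keys_empty]
    rfl
  have hkeys : M.keys = PySem.List.dedup (V.map (·.1)) := by
    rw [← hkeysG, hM]
    simp only [PySem.Dict.keys_mk, List.map_map]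
    rfl
  have hgetD : ∀ c, M.getD c [] = PySem.List.sorted2
      ((V.filter (fun t => t.1 == c)).map (fun t => pvObj2 t.2))
      (fun s => PySem.Str.lower (s.getD "name" ""))
      (fun s => PySem.Str.lower (s.getD "level" "")) := by
    intro c
    have h := pvGetD_mk_map (fun v => PySem.List.sorted2 v
        (fun s => PySem.Str.lower (s.getD "name" ""))
        (fun s => PySem.Str.lower (s.getD "level" ""))) rfl G.items c
    simp only [] at h
    rw [hM, h]
    rw [show PySem.Dict.mk G.items = G from rfl, hGfold]
    rw [PySem.Dict.getD_foldl_modify_append]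
    simp only [List.filter_map, List.map_map, PySem.Dict.getD_empty, List.nil_append]
    rfl
  have hinner : ∀ (lines : List String) (sl : List (PySem.Dict String String)),
      sl.foldl (fun lines s =>
        match s.get? "level" with
        | some l => if l ≠ "" then lines ++ ["- " ++ s.getD "name" "" ++ " (" ++ l ++ ")"]
                    else lines ++ ["- " ++ s.getD "name" ""]
        | none => lines ++ ["- " ++ s.getD "name" ""]) lines = lines ++ sl.map pvLine := by
    intro lines sl
    have hf : (fun (lines : List String) (s : PySem.Dict String String) =>
        match s.get? "level" with
        | some l => if l ≠ "" then lines ++ ["- " ++ s.getD "name" "" ++ " (" ++ l ++ ")"]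
                    else lines ++ ["- " ++ s.getD "name" ""]
        | none => lines ++ ["- " ++ s.getD "name" ""])
        = fun lines s => lines ++ [pvLine s] := by
      funext lines s
      unfold pvLine
      cases hs : s.get? "level" with
      | none => rfl
      | some l => by_cases hl : l = "" <;> simp [hl]
    rw [hf, PySem.List.foldl_append_singleton_eq_map]
  have houter : (fun (lines : List String) (category : String) =>
      List.foldl (fun lines s =>
        match s.get? "level" with
        | some l => if l ≠ "" then lines ++ ["- " ++ s.getD "name" "" ++ " (" ++ l ++ ")"]
                    else lines ++ ["- " ++ s.getD "name" ""]
        | none => lines ++ ["- " ++ s.getD "name" ""]) (lines ++ ["### " ++ category]) (M.getD category []) ++ [""])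
      = fun lines category => lines ++ (["### " ++ category] ++ (M.getD category []).map pvLine ++ [""]) := by
    funext lines category
    rw [hinner]
    simp [List.append_assoc]
  rw [houter, PySem.List.foldl_append_eq_flatMap, hkeys]
  simp only [List.nil_append]
  congr 1
  funext c
  have hfilter : V.filter (fun t => t.1 == c) = V.filter (fun t => decide (t.1 = c)) := by
    apply List.filter_congr
    intro x _
    by_cases h : x.1 = c <;> simp [h]
  rw [hgetD c, hfilter]
  rw [show (V.filter (fun t => decide (t.1 = c))).map (fun t => pvObj2 t.2)
        = ((V.filter (fun t => decide (t.1 = c))).map (·.2)).map pvObj2 from by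
      rw [List.map_map]; rfl]
  rw [pvSorted2_map]
  have hk1 : (fun a : String × String => PySem.Str.lower ((pvObj2 a).getD "name" "")) = (fun t : String × String => PySem.Str.lower t.1) := funext pvKeyName
  have hk2 : (fun a : String × String => PySem.Str.lower ((pvObj2 a).getD "level" "")) = (fun t : String × String => PySem.Str.lower t.2) := funext pvKeyLevel
  rw [hk1, hk2, List.map_map]
  have hline : (pvLine ∘ pvObj2) = (fun t : String × String =>
      if t.2 ≠ "" then "- " ++ t.1 ++ " (" ++ t.2 ++ ")" else "- " ++ t.1) :=
    funext fun t => pvLine_obj t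
  rw [hline]



-- ===== VERDICT (by name: the statement is the Claim_ definition above) =====
theorem render_skills_spec : Claim_equal_render_skills := by
  intro skills _
  unfold Spec_render_skills
  exact render_skills_eq skills
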